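-- pv_equiv track=rewrite | github.com/Jonathana1106/PythonITP | Practicas/Practica 4 Intro.py | aux
-- ===== SOURCE A (Python) =====
-- def aux(ref, ele, lista, i, r):
--     if i >= len(lista):
--         return r
--     elif ref == lista[i]:
--         r = r + [ref]
--         r = r + [ele]
--         return aux(ref, ele, lista, i+1, r)
--     else:
--         r = r + [lista[i]]
--         return aux(ref, ele, lista, i+1, r)
-- ===== SOURCE B (Python) =====
-- def aux(ref, ele, lista, i, r):
--     out = list(r)
--     for j in range(i, len(lista)):
--         x = lista[j]
--         if x == ref:
--             out += [ref, ele]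
--         else:
--             out.append(x)
--     return out
-- ===== Notes on version B (the rewrite author's own statement) =====
-- stated objective: faster
-- what changed: Replaces the tail recursion that rebinds r = r + [...] (copying the whole accumulator each step, and recursing once per element) by a single explicit loop over range(i, len(lista)) appending into one fresh local list.
import Mathlib
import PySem

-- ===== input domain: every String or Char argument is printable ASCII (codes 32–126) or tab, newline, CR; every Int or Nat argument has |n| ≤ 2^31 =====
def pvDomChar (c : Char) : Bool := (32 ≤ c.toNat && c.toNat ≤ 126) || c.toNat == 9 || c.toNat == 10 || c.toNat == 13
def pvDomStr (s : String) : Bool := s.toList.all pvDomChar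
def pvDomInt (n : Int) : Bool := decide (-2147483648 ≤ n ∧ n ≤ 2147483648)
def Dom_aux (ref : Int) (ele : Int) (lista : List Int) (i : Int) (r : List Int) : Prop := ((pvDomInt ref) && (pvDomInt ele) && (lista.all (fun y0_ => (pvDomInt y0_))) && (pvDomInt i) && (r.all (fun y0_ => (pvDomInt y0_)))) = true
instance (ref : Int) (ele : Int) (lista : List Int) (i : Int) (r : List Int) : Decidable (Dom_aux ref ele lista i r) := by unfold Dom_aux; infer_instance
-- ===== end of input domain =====

-- B replaces A's tail recursion (rebinding the accumulator each step) by one explicit loop over range(i, len(lista)); objective: simpler.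


-- ===== PORT A =====
def aux (ref : Int) (ele : Int) (lista : List Int) (i : Int) (r : List Int) : List Int :=
  if (lista.length : Int) ≤ i then r
  else
    match PySem.List.pyGet? lista i with
    | none => r  -- IndexError in Python (i < -len); excluded by Pre_aux
    | some x =>
      if ref == x then aux ref ele lista (i+1) ((r ++ [ref]) ++ [ele])
      else aux ref ele lista (i+1) (r ++ [x])
termination_by ((lista.length : Int) - i).toNat
decreasing_by all_goals (simp at *; omega)

-- ===== PORT B =====
def aux_alt (ref : Int) (ele : Int) (lista : List Int) (i : Int) (r : List Int) : List Int :=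
  (PySem.List.pyRange i (lista.length : Int) 1).foldl
    (fun out j =>
      match PySem.List.pyGet? lista j with
      | none => out  -- IndexError in Python (j < -len); excluded by Pre_aux
      | some x => if x == ref then out ++ [ref, ele] else out ++ [x])
    r

-- ===== PRECONDITION & SPEC =====
-- Pre_aux excludes exactly the inputs where Python A (and B alike) raises IndexError: i < -len(lista) with i < len(lista).
def Pre_aux (ref : Int) (ele : Int) (lista : List Int) (i : Int) (r : List Int) : Prop :=
  -(lista.length : Int) ≤ i
instance (ref : Int) (ele : Int) (lista : List Int) (i : Int) (r : List Int) : Decidable (Pre_aux ref ele lista i r) := by unfold Pre_aux; infer_instance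
def pvWitness_aux : Int × Int × List Int × Int × List Int := (2, 9, [1, 2, 3], 0, [])
def Spec_aux (ref : Int) (ele : Int) (lista : List Int) (i : Int) (r : List Int) (out : List Int) : Prop := out = aux_alt ref ele lista i r
instance (ref : Int) (ele : Int) (lista : List Int) (i : Int) (r : List Int) (out : List Int) : Decidable (Spec_aux ref ele lista i r out) := by unfold Spec_aux; infer_instance

-- ===== CLAIM (what is proved, stated in full; the proofs are below) =====
def Claim_equal_aux : Prop := ∀ (ref : Int) (ele : Int) (lista : List Int) (i : Int) (r : List Int), Dom_aux ref ele lista i r → Pre_aux ref ele lista i r → Spec_aux ref ele lista i r (aux ref ele lista i r)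

-- ===== LEMMAS AND PROOFS =====
theorem aux_eq_alt (ref ele : Int) (lista : List Int) :
    ∀ (n : Nat) (i : Int) (r : List Int), ((lista.length : Int) - i).toNat = n →
      -(lista.length : Int) ≤ i →
      aux ref ele lista i r = aux_alt ref ele lista i r := by
  intro n
  induction n with
  | zero =>
    intro i r hn hpre
    have hge : (lista.length : Int) ≤ i := by omega
    rw [aux, if_pos hge]
    unfold aux_alt
    rw [PySem.List.pyRange_one_eq_nil hge]
    rfl
  | succ k ih =>
    intro i r hn hpre
    have hlt : i < (lista.length : Int) := by omega
    rw [aux, if_neg (by omega)]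
    unfold aux_alt
    rw [PySem.List.pyRange_one_cons hlt]
    simp only [List.foldl_cons]
    have hsome : ∃ x, PySem.List.pyGet? lista i = some x := by
      rcases h : PySem.List.pyGet? lista i with _ | x
      · rw [PySem.List.pyGet?_eq_none_iff] at h
        exact absurd ⟨hpre, hlt⟩ h
      · exact ⟨x, rfl⟩
    rcases hsome with ⟨x, hx⟩
    simp only [hx]
    have hrec := fun r' => ih (i+1) r' (by omega) (by omega)
    by_cases hrx : ref = x
    · have hb : (ref == x) = true := by simp [hrx]
      have hb2 : (x == ref) = true := by simp [hrx]
      simp only [hb, hb2, if_true]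
      rw [hrec]
      unfold aux_alt
      simp
    · have hb : (ref == x) = false := by simp [hrx]
      have hb2 : (x == ref) = false := by simp [Ne.symm hrx]
      simp only [hb, hb2, Bool.false_eq_true, if_false]
      rw [hrec]
      rfl

-- ===== VERDICT (by name: the statement is the Claim_ definition above) =====
theorem aux_spec : Claim_equal_aux := by
  intro ref ele lista i r _ hpre
  exact aux_eq_alt ref ele lista _ i r rfl hpre
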